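-- pv_equiv track=rewrite | github.com/Berdichevski/python-practice | tests_find_words.py | overall_max_match
-- ===== SOURCE A (Python) =====
-- def get_match_length(a: str, b: str) -> int:
--     max_match = 0
--     for i in range(1, min(len(a), len(b)) + 1):
--         if a[:i] == b[-i:]:
--             max_match = i
--     return max_match
--
-- def overall_max_match(words: list[str]) -> int:
--     max_match = 0
--     for i in range(len(words)):
--         for j in range(len(words)):
--             if i != j:
--                 match = get_match_length(words[i], words[j])
--                 if match > max_match:
--                     max_match = match
--     return max_match
-- ===== SOURCE B (Python) =====
-- def overall_max_match(words: list[str]) -> int: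
--     # Descending scan with global pruning: for each ordered pair, try overlap
--     # lengths from min(len) downward, but never below the best found so far.
--     best = 0
--     for i, a in enumerate(words):
--         for j, b in enumerate(words):
--             if i != j:
--                 k = min(len(a), len(b))
--                 while k > best:
--                     if b.endswith(a[:k]):
--                         best = k
--                         break
--                     k -= 1
--     return best
-- ===== Notes on version B (the rewrite author's own statement) =====
-- stated objective: faster
-- what changed: Per pair, instead of scanning all overlap lengths upward and keeping the last match, B scans downward from min(len) with early exit and prunes the whole scan below the global best found so far.
import Mathlib
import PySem

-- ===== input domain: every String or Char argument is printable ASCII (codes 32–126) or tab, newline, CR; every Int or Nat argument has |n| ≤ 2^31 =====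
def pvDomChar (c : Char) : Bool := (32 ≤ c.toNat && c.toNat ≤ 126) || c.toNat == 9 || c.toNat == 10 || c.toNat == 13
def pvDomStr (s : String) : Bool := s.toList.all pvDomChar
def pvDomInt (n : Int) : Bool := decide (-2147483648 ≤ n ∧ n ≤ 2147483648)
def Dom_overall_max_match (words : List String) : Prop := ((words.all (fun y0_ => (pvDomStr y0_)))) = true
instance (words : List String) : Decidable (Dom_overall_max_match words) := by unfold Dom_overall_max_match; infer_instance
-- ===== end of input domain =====

-- B changes the per-pair scan: descending from min(len) with early exit, pruned below the
-- global best so far, instead of A's full ascending scan keeping the last match (faster in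
-- the typical case, same worst case).

-- ===== PORT A =====
def get_match_length (a b : String) : Int :=
  (PySem.List.pyRange 1 (min (PySem.Str.len a) (PySem.Str.len b) + 1) 1).foldl
    (fun mm i =>
      if PySem.Str.slice a none (some i) = PySem.Str.slice b (some (-i)) none then i else mm) 0

def overall_max_match (words : List String) : Int :=
  (PySem.List.pyRange 0 (words.length : Int) 1).foldl (fun mm i =>
    (PySem.List.pyRange 0 (words.length : Int) 1).foldl (fun mm j =>
      if i ≠ j then
        let m := get_match_length (PySem.List.pyGetD words i "") (PySem.List.pyGetD words j "")
        if m > mm then m else mm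
      else mm) mm) 0

-- ===== PORT B =====
-- the inner `while k > best` loop of Source B (best is never negative in B, so k = 0 exits)
def bOverlap (a b : String) : Nat → Int → Int
  | 0, best => best
  | (k+1), best =>
    if best < (k : Int) + 1 then
      if PySem.Str.endswith b (PySem.Str.slice a none (some ((k : Int) + 1))) then (k : Int) + 1
      else bOverlap a b k best
    else best

def overall_max_match_alt (words : List String) : Int :=
  (PySem.List.enumerate words 0).foldl (fun best p =>
    (PySem.List.enumerate words 0).foldl (fun best q =>
      if p.1 ≠ q.1 then
        bOverlap p.2 q.2 (min (PySem.Str.len p.2) (PySem.Str.len q.2)).toNat best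
      else best) best) 0

-- ===== PRECONDITION & SPEC =====
def Spec_overall_max_match (words : List String) (out : Int) : Prop := out = overall_max_match_alt words
instance (words : List String) (out : Int) : Decidable (Spec_overall_max_match words out) := by unfold Spec_overall_max_match; infer_instance

-- ===== CLAIM (what is proved, stated in full; the proofs are below) =====
def Claim_equal_overall_max_match : Prop := ∀ (words : List String), Dom_overall_max_match words → Spec_overall_max_match words (overall_max_match words)

-- ===== LEMMAS AND PROOFS =====

-- the per-pair maximum overlap, as a recursion on the candidate length
def pvF (a b : List Char) : Nat → Int
  | 0 => 0
  | (k+1) => if a.take (k+1) = b.drop (b.length - (k+1)) then (k : Int) + 1 else pvF a b k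

lemma pvF_le (a b : List Char) (k : Nat) : pvF a b k ≤ (k : Int) := by
  induction k with
  | zero => simp [pvF]
  | succ k ih => simp only [pvF]; split <;> omega

-- A's ascending keep-last scan computes pvF
lemma getMatch_eq_pvF (a b : String) :
    get_match_length a b = pvF a.toList b.toList (min (PySem.Str.len a) (PySem.Str.len b)).toNat := by
  unfold get_match_length
  generalize hm : (min (PySem.Str.len a) (PySem.Str.len b)).toNat = m
  have hmin : min (PySem.Str.len a) (PySem.Str.len b) = (m : Int) := by
    have h1 : PySem.Str.len a = (a.toList.length : Int) := by simp [PySem.Str.len_eq]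
    have h2 : PySem.Str.len b = (b.toList.length : Int) := by simp [PySem.Str.len_eq]
    omega
  rw [hmin]
  clear hm hmin
  induction m with
  | zero => simp [PySem.List.pyRange_one_eq_nil, pvF]
  | succ m ih =>
    have hcast : ((m + 1 : Nat) : Int) + 1 = ((m : Int) + 1) + 1 := by push_cast; ring
    rw [hcast, PySem.List.pyRange_one_succ_right (by omega), List.foldl_append, ih]
    simp only [List.foldl_cons, List.foldl_nil, pvF]
    have hcond : (PySem.Str.slice a none (some ((m : Int) + 1))
          = PySem.Str.slice b (some (-((m : Int) + 1))) none)
        ↔ (a.toList.take (m+1) = b.toList.drop (b.toList.length - (m+1))) := by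
      rw [← String.toList_inj, PySem.Str.toList_slice, PySem.Str.toList_slice]
      simp only [PySem.Chars.slice_eq_listSlice]
      have h1 : ((m : Int) + 1) = ((m + 1 : Nat) : Int) := by omega
      rw [h1, PySem.List.slice_to_natCast, PySem.List.slice_from_neg_natCast _ _ (by omega)]
    split_ifs with h1 h2 h2
    · rfl
    · exact absurd (hcond.mp h1) h2
    · exact absurd (hcond.mpr h2) h1
    · rfl

-- the endswith test of B agrees with the slice-equality test, for lengths within both words
lemma endswith_iff_eq_drop (a b : List Char) (k : Nat)
    (ha : k + 1 ≤ a.length) (_hb : k + 1 ≤ b.length) :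
    (PySem.Chars.endswith b (a.take (k+1)) = true)
      ↔ a.take (k+1) = b.drop (b.length - (k+1)) := by
  rw [PySem.Chars.endswith_iff, List.suffix_iff_eq_drop]
  have : (a.take (k+1)).length = k + 1 := by simp [List.length_take]; omega
  rw [this]

-- B's pruned descending scan computes max best (pvF …)
lemma bOverlap_eq_max (a b : String) (k : Nat) (best : Int)
    (hk : (k : Int) ≤ min (PySem.Str.len a) (PySem.Str.len b)) (hbest : 0 ≤ best) :
    bOverlap a b k best = max best (pvF a.toList b.toList k) := by
  have hla : PySem.Str.len a = (a.toList.length : Int) := by simp [PySem.Str.len_eq]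
  have hlb : PySem.Str.len b = (b.toList.length : Int) := by simp [PySem.Str.len_eq]
  induction k with
  | zero => simp [bOverlap, pvF]; omega
  | succ k ih =>
    have hka : k + 1 ≤ a.toList.length := by omega
    have hkb : k + 1 ≤ b.toList.length := by omega
    have hcond : PySem.Str.endswith b (PySem.Str.slice a none (some ((k : Int) + 1)))
        = PySem.Chars.endswith b.toList (a.toList.take (k+1)) := by
      rw [PySem.Str.endswith_eq, PySem.Str.toList_slice]
      simp only [PySem.Chars.slice_eq_listSlice]
      have h1 : ((k : Int) + 1) = ((k + 1 : Nat) : Int) := by omega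
      rw [h1, PySem.List.slice_to_natCast]
    simp only [bOverlap, pvF, hcond]
    split_ifs with h1 h2 h3 h3
    · omega
    · exact absurd ((endswith_iff_eq_drop _ _ _ hka hkb).mp h2) h3
    · exact absurd ((endswith_iff_eq_drop _ _ _ hka hkb).mpr h3) h2
    · rw [ih (by omega)]
    · omega
    · have := pvF_le a.toList b.toList k
      omega

-- enumerate of a snoc
lemma enumerate_append_singleton {α : Type} (xs : List α) (x : α) (s : Int) :
    PySem.List.enumerate (xs ++ [x]) s = PySem.List.enumerate xs s ++ [(s + xs.length, x)] := by
  induction xs generalizing s with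
  | nil => simp [PySem.List.enumerate_nil, PySem.List.enumerate_cons]
  | cons y ys ih =>
    simp only [List.cons_append, PySem.List.enumerate_cons, ih, List.length_cons]
    congr 2
    push_cast; ring

-- an index loop over words is a loop over enumerate
lemma foldl_pyRange_eq_enumerate {α β : Type} (xs : List β) (d : β) (g : α → Int → β → α) (init : α) :
    (PySem.List.pyRange 0 (xs.length : Int) 1).foldl (fun acc j => g acc j (PySem.List.pyGetD xs j d)) init
      = (PySem.List.enumerate xs 0).foldl (fun acc p => g acc p.1 p.2) init := by
  induction xs using List.reverseRecOn generalizing init with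
  | nil => simp [PySem.List.pyRange_one_eq_nil, PySem.List.enumerate_nil]
  | append_singleton ys y ih =>
    have hlen : ((ys ++ [y]).length : Int) = (ys.length : Int) + 1 := by simp
    rw [hlen, PySem.List.pyRange_one_succ_right (by positivity), List.foldl_append,
      enumerate_append_singleton, List.foldl_append]
    simp only [List.foldl_cons, List.foldl_nil]
    have hlast : PySem.List.pyGetD (ys ++ [y]) (ys.length : Int) d = y := by
      simp [PySem.List.pyGetD_natCast]
    rw [hlast]
    have hcongr : ∀ (acc : α),
        (PySem.List.pyRange 0 (ys.length : Int) 1).foldl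
          (fun acc j => g acc j (PySem.List.pyGetD (ys ++ [y]) j d)) acc
        = (PySem.List.pyRange 0 (ys.length : Int) 1).foldl
          (fun acc j => g acc j (PySem.List.pyGetD ys j d)) acc := by
      intro acc
      apply PySem.List.foldl_congr_mem
      intro a2 j hj
      rw [PySem.List.mem_pyRange_one] at hj
      have h0 : PySem.List.pyGetD (ys ++ [y]) j d = PySem.List.pyGetD ys j d := by
        rw [PySem.List.pyGetD_of_nonneg _ _ hj.1, PySem.List.pyGetD_of_nonneg _ _ hj.1]
        have hlt : j.toNat < ys.length := by omega
        simp [List.getD, List.getElem?_append_left hlt]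
      rw [h0]
    rw [hcongr, ih]
    simp

-- fold congruence under a nonnegativity invariant
lemma foldl_congr_nonneg {β : Type} (l : List β) (f g : Int → β → Int)
    (h : ∀ acc x, 0 ≤ acc → x ∈ l → f acc x = g acc x)
    (hf : ∀ acc x, 0 ≤ acc → x ∈ l → 0 ≤ f acc x)
    (init : Int) (h0 : 0 ≤ init) : l.foldl f init = l.foldl g init := by
  induction l generalizing init with
  | nil => rfl
  | cons x xs ih =>
    simp only [List.foldl_cons]
    rw [h init x h0 (by simp)]
    exact ih (fun a y ha hy => h a y ha (by simp [hy]))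
      (fun a y ha hy => hf a y ha (by simp [hy]))
      (g init x) (by rw [← h init x h0 (by simp)]; exact hf init x h0 (by simp))

-- the common nonnegative-accumulator step both programs fold
def pvStep (p q : Int × String) (acc : Int) : Int :=
  if p.1 ≠ q.1 then
    max acc (pvF p.2.toList q.2.toList (min (PySem.Str.len p.2) (PySem.Str.len q.2)).toNat)
  else acc

lemma pvStep_nonneg (p q : Int × String) (acc : Int) (h : 0 ≤ acc) : 0 ≤ pvStep p q acc := by
  unfold pvStep; split
  · exact le_trans h (le_max_left _ _)
  · exact h

lemma inner_nonneg (l : List (Int × String)) (p : Int × String) (acc : Int) (h : 0 ≤ acc) :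
    0 ≤ l.foldl (fun acc q => pvStep p q acc) acc := by
  induction l generalizing acc with
  | nil => exact h
  | cons q qs ih => exact ih _ (pvStep_nonneg p q acc h)

-- B's per-pair step is pvStep, for a nonnegative accumulator
lemma bStep_eq_pvStep (p q : Int × String) (acc : Int) (h : 0 ≤ acc) :
    (if p.1 ≠ q.1 then
        bOverlap p.2 q.2 (min (PySem.Str.len p.2) (PySem.Str.len q.2)).toNat acc
      else acc) = pvStep p q acc := by
  have hla : PySem.Str.len p.2 = (p.2.toList.length : Int) := by simp [PySem.Str.len_eq]
  have hlb : PySem.Str.len q.2 = (q.2.toList.length : Int) := by simp [PySem.Str.len_eq]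
  unfold pvStep
  split_ifs with hpq
  · exact bOverlap_eq_max p.2 q.2 _ acc (by omega) h
  · rfl

lemma A_eq_common (words : List String) :
    overall_max_match words
      = (PySem.List.enumerate words 0).foldl (fun acc p =>
          (PySem.List.enumerate words 0).foldl (fun acc q => pvStep p q acc) acc) 0 := by
  unfold overall_max_match
  refine Eq.trans (foldl_pyRange_eq_enumerate words "" (fun mm i a =>
    (PySem.List.pyRange 0 (words.length : Int) 1).foldl (fun mm j =>
      if i ≠ j then
        let m := get_match_length a (PySem.List.pyGetD words j "")
        if m > mm then m else mm
      else mm) mm) 0) ?_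
  apply PySem.List.foldl_congr_mem
  intro acc p _
  refine Eq.trans (foldl_pyRange_eq_enumerate words "" (fun mm j b =>
    if p.1 ≠ j then
      let m := get_match_length p.2 b
      if m > mm then m else mm
    else mm) acc) ?_
  apply PySem.List.foldl_congr_mem
  intro acc2 q _
  simp only [pvStep, getMatch_eq_pvF]
  split_ifs <;> omega

lemma B_eq_common (words : List String) :
    overall_max_match_alt words
      = (PySem.List.enumerate words 0).foldl (fun acc p =>
          (PySem.List.enumerate words 0).foldl (fun acc q => pvStep p q acc) acc) 0 := by
  unfold overall_max_match_alt
  apply foldl_congr_nonneg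
  · intro acc p hacc _
    apply foldl_congr_nonneg
    · intro acc2 q hacc2 _
      exact bStep_eq_pvStep p q acc2 hacc2
    · intro acc2 q hacc2 _
      rw [bStep_eq_pvStep p q acc2 hacc2]
      exact pvStep_nonneg p q acc2 hacc2
    · exact hacc
  · intro acc p hacc _
    have h1 : ((PySem.List.enumerate words 0).foldl (fun best q =>
        if p.1 ≠ q.1 then
          bOverlap p.2 q.2 (min (PySem.Str.len p.2) (PySem.Str.len q.2)).toNat best
        else best) acc)
        = (PySem.List.enumerate words 0).foldl (fun acc q => pvStep p q acc) acc := by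
      apply foldl_congr_nonneg
      · intro acc2 q hacc2 _
        exact bStep_eq_pvStep p q acc2 hacc2
      · intro acc2 q hacc2 _
        rw [bStep_eq_pvStep p q acc2 hacc2]
        exact pvStep_nonneg p q acc2 hacc2
      · exact hacc
    rw [h1]
    exact inner_nonneg _ p acc hacc
  · exact le_refl 0

-- ===== VERDICT (by name: the statement is the Claim_ definition above) =====
theorem overall_max_match_spec : Claim_equal_overall_max_match := by
  intro words _
  unfold Spec_overall_max_match
  rw [A_eq_common, B_eq_common]
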